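-- pv_equiv track=rewrite | github.com/prodrom3/gitpulse | core/commands/completion.py | strip_block
-- ===== SOURCE A (Python) =====
-- BEGIN_MARKER: str = "# BEGIN nostos completion (managed by `nostos completion install`)"
--
-- END_MARKER: str = "# END nostos completion"
--
-- def strip_block(content: str) -> str:
--     """Remove any existing nostos block (BEGIN...END, inclusive).
--
--     If the markers appear multiple times (shouldn't), strip all. If the
--     begin marker is present but end is missing, leave the file alone to
--     avoid deleting the rest of the rc.
--     """
--     out_lines: list[str] = []
--     skipping = False
--     saw_end = False
--     for line in content.splitlines(keepends=True):
--         stripped = line.rstrip("\r\n")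
--         if not skipping and stripped == BEGIN_MARKER:
--             skipping = True
--             continue
--         if skipping and stripped == END_MARKER:
--             skipping = False
--             saw_end = True
--             continue
--         if not skipping:
--             out_lines.append(line)
--     if skipping and not saw_end:
--         # Malformed; bail out by not stripping anything.
--         return content
--     return "".join(out_lines)
-- ===== SOURCE B (Python) =====
-- BEGIN_MARKER: str = "# BEGIN nostos completion (managed by `nostos completion install`)"
--
-- END_MARKER: str = "# END nostos completion"
--
--
-- def _strip(lines, closed):
--     """Return the kept lines, or None when a dangling BEGIN forces a bail-out."""
--     keys = [l.rstrip("\r\n") for l in lines]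
--     try:
--         b = keys.index(BEGIN_MARKER)
--     except ValueError:
--         return lines
--     try:
--         e = keys[b + 1:].index(END_MARKER)
--     except ValueError:
--         return lines[:b] if closed else None
--     rest = _strip(lines[b + 1 + e + 1:], True)
--     return None if rest is None else lines[:b] + rest
--
--
-- def strip_block(content: str) -> str:
--     res = _strip(content.splitlines(keepends=True), False)
--     return content if res is None else "".join(res)
-- ===== Notes on version B (the rewrite author's own statement) =====
-- stated objective: alternative
-- what changed: A scans line-by-line with skipping/saw_end state flags; B recursively locates each BEGIN with list.index, finds the matching END in the tail, concatenates the kept prefixes, and signals the bail-out (dangling BEGIN with no block ever closed) with a None result instead of flags.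
import Mathlib
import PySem

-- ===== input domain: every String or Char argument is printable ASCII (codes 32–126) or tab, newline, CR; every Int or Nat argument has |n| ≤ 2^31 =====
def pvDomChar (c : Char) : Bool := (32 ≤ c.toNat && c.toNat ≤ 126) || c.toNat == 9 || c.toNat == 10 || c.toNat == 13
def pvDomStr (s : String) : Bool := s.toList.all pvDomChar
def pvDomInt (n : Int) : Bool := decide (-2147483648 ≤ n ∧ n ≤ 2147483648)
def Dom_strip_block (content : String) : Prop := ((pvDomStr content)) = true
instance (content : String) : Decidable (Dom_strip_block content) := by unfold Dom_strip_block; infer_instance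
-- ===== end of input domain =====

-- B replaces A's per-line state machine (skipping/saw_end flags) by a recursive
-- index-jump decomposition: find the next BEGIN, find its END in the tail, keep the
-- prefix, recurse after the END; a dangling BEGIN with no block ever closed is a
-- None bail-out. Same cost, different decomposition.

-- shared library-call helpers: content.splitlines(keepends=True) and line.rstrip("\r\n"),
-- ported by hand (exact on the ASCII domain: line breaks are '\n', '\r', '\r\n')
def pvSplitKEAux : List Char → List Char → List (List Char)
  | [], acc => if acc = [] then [] else [acc.reverse]
  | '\n' :: rest, acc => (acc.reverse ++ ['\n']) :: pvSplitKEAux rest []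
  | '\r' :: '\n' :: rest, acc => (acc.reverse ++ ['\r', '\n']) :: pvSplitKEAux rest []
  | '\r' :: rest, acc => (acc.reverse ++ ['\r']) :: pvSplitKEAux rest []
  | c :: rest, acc => pvSplitKEAux rest (c :: acc)

def pvSplitKE (cs : List Char) : List (List Char) := pvSplitKEAux cs []

def pvRstripCRLF (cs : List Char) : List Char :=
  (cs.reverse.dropWhile (fun c => c == '\n' || c == '\r')).reverse

def pvBegin : List Char := "# BEGIN nostos completion (managed by `nostos completion install`)".toList

def pvEnd : List Char := "# END nostos completion".toList

-- ===== PORT A =====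
-- the for-loop over lines with state (out_lines, skipping, saw_end)
def stripLoopA : List (List Char) → List (List Char) → Bool → Bool →
    List (List Char) × Bool × Bool
  | [], out, skipping, saw => (out, skipping, saw)
  | line :: rest, out, skipping, saw =>
    let stripped := pvRstripCRLF line
    if !skipping && stripped = pvBegin then stripLoopA rest out true saw
    else if skipping && stripped = pvEnd then stripLoopA rest out false true
    else if !skipping then stripLoopA rest (out ++ [line]) skipping saw
    else stripLoopA rest out skipping saw

def strip_block (content : String) : String :=
  let r := stripLoopA (pvSplitKE content.toList) [] false false
  if r.2.1 && !r.2.2 then content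
  else String.ofList (PySem.Chars.join [] r.1)

-- ===== PORT B =====
-- _strip(lines, closed): the kept lines, or none on the bail-out
def stripGoB (lines : List (List Char)) (closed : Bool) : Option (List (List Char)) :=
  match h : PySem.List.index? (lines.map pvRstripCRLF) pvBegin with
  | none => some lines
  | some b =>
    match PySem.List.index? ((lines.map pvRstripCRLF).drop (b + 1)) pvEnd with
    | none => if closed then some (lines.take b) else none
    | some e =>
      match stripGoB (lines.drop (b + 1 + e + 1)) true with
      | none => none
      | some rest => some (lines.take b ++ rest)
termination_by lines.length
decreasing_by
  obtain ⟨hk, -, -⟩ := PySem.List.getElem_of_index?_eq_some h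
  simp at hk ⊢
  omega

def strip_block_alt (content : String) : String :=
  match stripGoB (pvSplitKE content.toList) false with
  | none => content
  | some out => String.ofList (PySem.Chars.join [] out)

-- ===== PRECONDITION & SPEC =====
def Spec_strip_block (content : String) (out : String) : Prop := out = strip_block_alt content
instance (content : String) (out : String) : Decidable (Spec_strip_block content out) := by unfold Spec_strip_block; infer_instance

-- ===== CLAIM (what is proved, stated in full; the proofs are below) =====
def Claim_equal_strip_block : Prop := ∀ (content : String), Dom_strip_block content → Spec_strip_block content (strip_block content)

-- ===== LEMMAS AND PROOFS =====

-- non-dependent one-step unfolding of B's recursion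
theorem stripGoB_eq (lines : List (List Char)) (closed : Bool) : stripGoB lines closed =
    match PySem.List.index? (lines.map pvRstripCRLF) pvBegin with
    | none => some lines
    | some b =>
      match PySem.List.index? ((lines.map pvRstripCRLF).drop (b + 1)) pvEnd with
      | none => if closed then some (lines.take b) else none
      | some e => (stripGoB (lines.drop (b + 1 + e + 1)) true).map (lines.take b ++ ·) := by
  rw [stripGoB]
  split
  case h_1 h1 => simp only [h1]
  case h_2 b h1 =>
    simp only [h1]
    cases h2 : PySem.List.index? ((lines.map pvRstripCRLF).drop (b + 1)) pvEnd with
    | none => rfl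
    | some e =>
      cases hs : stripGoB (lines.drop (b + 1 + e + 1)) true <;> simp [hs]

-- A's loop while skipping: drop until the first END
theorem loopA_skipping (lines : List (List Char)) (out : List (List Char)) (saw : Bool) :
    stripLoopA lines out true saw =
      match PySem.List.index? (lines.map pvRstripCRLF) pvEnd with
      | none => (out, true, saw)
      | some e => stripLoopA (lines.drop (e + 1)) out false true := by
  induction lines generalizing saw with
  | nil => simp [stripLoopA, PySem.List.index?]
  | cons l rest ih =>
    by_cases hl : pvRstripCRLF l = pvEnd
    · have h0 : PySem.List.index? ((l :: rest).map pvRstripCRLF) pvEnd = some 0 := by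
        simp only [List.map_cons, hl]
        exact PySem.List.index?_cons_self _ _
      rw [h0]
      simp only [stripLoopA]
      rw [if_neg (by simp), if_pos (by simp [hl])]
      simp
    · have hidx : PySem.List.index? ((l :: rest).map pvRstripCRLF) pvEnd
          = (PySem.List.index? (rest.map pvRstripCRLF) pvEnd).map (· + 1) := by
        simp only [List.map_cons]
        exact PySem.List.index?_cons_of_ne _ hl
      rw [hidx]
      simp only [stripLoopA]
      rw [if_neg (by simp), if_neg (by simp [hl]), if_neg (by simp)]
      rw [ih]
      cases PySem.List.index? (rest.map pvRstripCRLF) pvEnd with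
      | none => simp
      | some e => simp

-- B's recursion, head line is not a BEGIN: the head is kept
theorem stripGoB_cons_ne (l : List Char) (rest : List (List Char)) (closed : Bool)
    (h : pvRstripCRLF l ≠ pvBegin) :
    stripGoB (l :: rest) closed = (stripGoB rest closed).map (l :: ·) := by
  rw [stripGoB_eq, stripGoB_eq rest]
  simp only [List.map_cons]
  rw [PySem.List.index?_cons_of_ne _ h]
  cases hb : PySem.List.index? (rest.map pvRstripCRLF) pvBegin with
  | none => simp
  | some b =>
    simp only [Option.map_some]
    have hdrop : (pvRstripCRLF l :: rest.map pvRstripCRLF).drop (b + 1 + 1)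
        = (rest.map pvRstripCRLF).drop (b + 1) := by simp
    rw [hdrop]
    cases he : PySem.List.index? ((rest.map pvRstripCRLF).drop (b + 1)) pvEnd with
    | none => cases closed <;> simp [List.take_succ_cons]
    | some e =>
      have hdrop2 : (l :: rest).drop (b + 1 + 1 + e + 1) = rest.drop (b + 1 + e + 1) := by
        have h3 : b + 1 + 1 + e + 1 = (b + 1 + e + 1) + 1 := by omega
        rw [h3, List.drop_succ_cons]
      cases hs : stripGoB (rest.drop (b + 1 + e + 1)) true <;>
        simp [hdrop2, hs, List.take_succ_cons]

-- B's recursion, head line is a BEGIN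
theorem stripGoB_cons_begin (l : List Char) (rest : List (List Char)) (closed : Bool)
    (h : pvRstripCRLF l = pvBegin) :
    stripGoB (l :: rest) closed =
      match PySem.List.index? (rest.map pvRstripCRLF) pvEnd with
      | none => if closed then some [] else none
      | some e => stripGoB (rest.drop (e + 1)) true := by
  rw [stripGoB_eq]
  simp only [List.map_cons, h]
  rw [PySem.List.index?_cons_self]
  simp only [List.drop_succ_cons, List.drop_zero, List.take_zero]
  cases he : PySem.List.index? (rest.map pvRstripCRLF) pvEnd with
  | none => rfl
  | some e =>
    cases hs : stripGoB (rest.drop (e + 1)) true <;> simp [hs, Nat.add_comm 1 e]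

-- the main invariant: A's loop (not skipping) vs B's recursion
theorem main_inv : ∀ (n : Nat) (lines : List (List Char)), lines.length ≤ n →
    ∀ (out : List (List Char)) (saw : Bool),
    match stripGoB lines saw with
    | none => ∃ out', stripLoopA lines out false saw = (out', true, false)
    | some res => ∃ sk sw, stripLoopA lines out false saw = (out ++ res, sk, sw)
        ∧ (sk = true → sw = true) := by
  intro n
  induction n with
  | zero =>
    intro lines hlen out saw
    have hnil : lines = [] := List.length_eq_zero_iff.mp (Nat.le_zero.mp hlen)
    subst hnil
    rw [stripGoB_eq]
    simp [PySem.List.index?, stripLoopA]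
  | succ n ih =>
    intro lines hlen out saw
    cases lines with
    | nil =>
      rw [stripGoB_eq]
      simp [PySem.List.index?, stripLoopA]
    | cons l rest =>
      by_cases hl : pvRstripCRLF l = pvBegin
      · -- head is BEGIN: A switches to skipping, B scans for END
        rw [stripGoB_cons_begin l rest saw hl]
        have hA : stripLoopA (l :: rest) out false saw = stripLoopA rest out true saw := by
          simp only [stripLoopA]
          rw [if_pos (by simp [hl])]
        rw [hA, loopA_skipping]
        cases he : PySem.List.index? (rest.map pvRstripCRLF) pvEnd with
        | none =>
          cases saw with
          | false => exact ⟨out, rfl⟩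
          | true => exact ⟨true, true, by simp, by simp⟩
        | some e =>
          have hlen' : (rest.drop (e + 1)).length ≤ n := by
            have h4 : rest.length ≤ n := by simpa using Nat.le_of_succ_le_succ hlen
            have h5 : (rest.drop (e + 1)).length = rest.length - (e + 1) := List.length_drop
            omega
          have hi := ih (rest.drop (e + 1)) hlen' out true
          cases hg : stripGoB (rest.drop (e + 1)) true with
          | none => rw [hg] at hi; simpa [hg] using hi
          | some res => rw [hg] at hi; simpa [hg] using hi
      · -- head kept by both
        rw [stripGoB_cons_ne l rest saw hl]
        have hA : stripLoopA (l :: rest) out false saw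
            = stripLoopA rest (out ++ [l]) false saw := by
          simp only [stripLoopA]
          rw [if_neg (by simp [hl]), if_neg (by simp), if_pos (by simp)]
        rw [hA]
        have hlen' : rest.length ≤ n := by simpa using Nat.le_of_succ_le_succ hlen
        have hi := ih rest hlen' (out ++ [l]) saw
        cases hg : stripGoB rest saw with
        | none =>
          rw [hg] at hi
          simpa using hi
        | some res =>
          rw [hg] at hi
          obtain ⟨sk, sw, heq, himp⟩ := hi
          exact ⟨sk, sw, by simpa using heq, himp⟩

-- ===== VERDICT (by name: the statement is the Claim_ definition above) =====
theorem strip_block_spec : Claim_equal_strip_block := by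
  intro content _
  unfold Spec_strip_block strip_block strip_block_alt
  have h := main_inv (pvSplitKE content.toList).length (pvSplitKE content.toList) le_rfl [] false
  cases hg : stripGoB (pvSplitKE content.toList) false with
  | none =>
    rw [hg] at h
    obtain ⟨out', heq⟩ := h
    simp [heq]
  | some res =>
    rw [hg] at h
    obtain ⟨sk, sw, heq, himp⟩ := h
    simp only [heq]
    cases sk with
    | false => simp
    | true => simp [himp rfl]
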